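-- pv_equiv track=rewrite | github.com/hsamudrala378/ChargerUptime | chargeUptime.py | calculate_uptime
-- ===== SOURCE A (Python) =====
-- def calculate_uptime(stations, reports):
--     charger_uptime = {}
--     charger_total_time = {}
--
--     for charger_id, start_time, end_time, up in reports:
--         duration = end_time - start_time
--         if charger_id not in charger_uptime:
--             charger_uptime[charger_id] = 0
--             charger_total_time[charger_id] = 0
--
--         charger_total_time[charger_id] += duration
--         if up:
--             charger_uptime[charger_id] += duration
--
--     station_uptime = {}
--
--     for station_id, charger_ids in stations.items():
--         total_uptime = 0
--         total_time = 0
--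
--         for charger_id in charger_ids:
--             if charger_id in charger_uptime:
--                 total_uptime += charger_uptime[charger_id]
--                 total_time += charger_total_time[charger_id]
--
--         if total_time > 0:
--             uptime_percentage = (total_uptime * 100) // total_time
--             station_uptime[station_id] = uptime_percentage
--         else:
--             station_uptime[station_id] = 0
--
--     return station_uptime
-- ===== SOURCE B (Python) =====
-- def calculate_uptime(stations, reports):
--     # Per-station single formula: scan reports once per station, weighting each
--     # report's duration by the multiplicity of its charger in the station's list.
--     result = {}
--     for station_id, charger_ids in stations.items():
--         total_uptime = 0
--         total_time = 0
--         for charger_id, start_time, end_time, up in reports: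
--             n = charger_ids.count(charger_id)
--             if n:
--                 d = (end_time - start_time) * n
--                 total_time += d
--                 if up:
--                     total_uptime += d
--         result[station_id] = (total_uptime * 100) // total_time if total_time > 0 else 0
--     return result
-- ===== Notes on version B (the rewrite author's own statement) =====
-- stated objective: alternative
-- what changed: B drops both charger-keyed dicts: instead of pre-aggregating per-charger totals and re-scanning them per station, it computes each station's totals directly in one pass over the reports, weighting every report's duration by the multiplicity of its charger in the station's charger list.
import Mathlib
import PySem

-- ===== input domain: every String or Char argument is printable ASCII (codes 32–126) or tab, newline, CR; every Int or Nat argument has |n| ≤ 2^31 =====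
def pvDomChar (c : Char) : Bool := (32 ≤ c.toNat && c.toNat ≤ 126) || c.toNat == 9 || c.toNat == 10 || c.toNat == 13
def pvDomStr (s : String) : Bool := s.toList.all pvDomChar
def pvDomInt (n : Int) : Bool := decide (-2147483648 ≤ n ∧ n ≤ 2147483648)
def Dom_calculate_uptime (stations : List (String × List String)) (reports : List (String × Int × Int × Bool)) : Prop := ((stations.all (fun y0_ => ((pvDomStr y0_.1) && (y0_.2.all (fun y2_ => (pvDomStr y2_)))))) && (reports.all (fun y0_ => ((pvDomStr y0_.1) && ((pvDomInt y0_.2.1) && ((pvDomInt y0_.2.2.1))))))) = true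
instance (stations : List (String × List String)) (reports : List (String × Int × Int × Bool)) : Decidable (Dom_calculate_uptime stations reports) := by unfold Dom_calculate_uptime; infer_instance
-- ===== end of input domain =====

-- ===== PORT A =====
-- B differs from A by decomposition only: one report scan per station (no charger dicts); return-value equivalence.
-- A-side helpers: the report loop (two charger-keyed dicts) and the per-station scan of the charger list.
def pvStepA (p : PySem.Dict String Int × PySem.Dict String Int) (r : String × Int × Int × Bool) :
    PySem.Dict String Int × PySem.Dict String Int :=
  let duration := r.2.2.1 - r.2.1
  let p := if p.1.contains r.1 then p else (p.1.insert r.1 0, p.2.insert r.1 0)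
  let ct := p.2.insert r.1 (p.2.getD r.1 0 + duration)
  let cu := if r.2.2.2 then p.1.insert r.1 (p.1.getD r.1 0 + duration) else p.1
  (cu, ct)

def pvScoreA (st : PySem.Dict String Int × PySem.Dict String Int) (charger_ids : List String) : Int :=
  let q := charger_ids.foldl
    (fun (q : Int × Int) c =>
      if st.1.contains c then (q.1 + st.1.getD c 0, q.2 + st.2.getD c 0) else q)
    (0, 0)
  if q.2 > 0 then PySem.Int.floordiv (q.1 * 100) q.2 else 0

def calculate_uptime (stations : List (String × List String)) (reports : List (String × Int × Int × Bool)) : List (String × Int) :=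
  let st := reports.foldl pvStepA (PySem.Dict.empty, PySem.Dict.empty)
  (stations.foldl (fun (acc : PySem.Dict String Int) sc => acc.insert sc.1 (pvScoreA st sc.2))
    PySem.Dict.empty).items

-- ===== PORT B =====
-- B-side helper: one pass over the reports for a single station's charger list.
def pvScoreB (reports : List (String × Int × Int × Bool)) (charger_ids : List String) : Int :=
  let q := reports.foldl
    (fun (q : Int × Int) r =>
      let n := PySem.List.count charger_ids r.1
      if n ≠ 0 then
        let d := (r.2.2.1 - r.2.1) * (n : Int)
        ((if r.2.2.2 then q.1 + d else q.1), q.2 + d)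
      else q)
    (0, 0)
  if q.2 > 0 then PySem.Int.floordiv (q.1 * 100) q.2 else 0

def calculate_uptime_alt (stations : List (String × List String)) (reports : List (String × Int × Int × Bool)) : List (String × Int) :=
  (stations.foldl (fun (acc : PySem.Dict String Int) sc => acc.insert sc.1 (pvScoreB reports sc.2))
    PySem.Dict.empty).items

-- ===== PRECONDITION & SPEC =====
def Spec_calculate_uptime (stations : List (String × List String)) (reports : List (String × Int × Int × Bool)) (out : List (String × Int)) : Prop := out = calculate_uptime_alt stations reports
instance (stations : List (String × List String)) (reports : List (String × Int × Int × Bool)) (out : List (String × Int)) : Decidable (Spec_calculate_uptime stations reports out) := by unfold Spec_calculate_uptime; infer_instance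

-- ===== CLAIM (what is proved, stated in full; the proofs are below) =====
def Claim_equal_calculate_uptime : Prop := ∀ (stations : List (String × List String)) (reports : List (String × Int × Int × Bool)), Dom_calculate_uptime stations reports → Spec_calculate_uptime stations reports (calculate_uptime stations reports)

-- ===== LEMMAS AND PROOFS =====
-- per-charger totals of A's first loop, expressed as sums over the report list
def pvT (c : String) (rs : List (String × Int × Int × Bool)) : Int :=
  (rs.map (fun r => if r.1 = c then r.2.2.1 - r.2.1 else 0)).sum

def pvU (c : String) (rs : List (String × Int × Int × Bool)) : Int :=
  (rs.map (fun r => if r.1 = c then (if r.2.2.2 then r.2.2.1 - r.2.1 else 0) else 0)).sum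

theorem pvT_append (c : String) (rs : List (String × Int × Int × Bool)) (r : String × Int × Int × Bool) :
    pvT c (rs ++ [r]) = pvT c rs + (if r.1 = c then r.2.2.1 - r.2.1 else 0) := by
  simp [pvT]

theorem pvU_append (c : String) (rs : List (String × Int × Int × Bool)) (r : String × Int × Int × Bool) :
    pvU c (rs ++ [r]) = pvU c rs + (if r.1 = c then (if r.2.2.2 then r.2.2.1 - r.2.1 else 0) else 0) := by
  simp [pvU]

theorem pvT_zero (c : String) (rs : List (String × Int × Int × Bool))
    (h : rs.any (fun r => r.1 == c) = false) : pvT c rs = 0 ∧ pvU c rs = 0 := by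
  induction rs with
  | nil => simp [pvT, pvU]
  | cons r rs ih =>
    simp only [List.any_cons, Bool.or_eq_false_iff, beq_eq_false_iff_ne] at h
    have := ih h.2
    simp [pvT, pvU, List.map_cons, List.sum_cons, h.1] at this ⊢
    simp [this.1, this.2]

theorem pvFoldA_inv (rs : List (String × Int × Int × Bool)) (c : String) :
    (rs.foldl pvStepA (PySem.Dict.empty, PySem.Dict.empty)).2.getD c 0 = pvT c rs ∧
    (rs.foldl pvStepA (PySem.Dict.empty, PySem.Dict.empty)).1.getD c 0 = pvU c rs ∧
    (rs.foldl pvStepA (PySem.Dict.empty, PySem.Dict.empty)).1.contains c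
      = rs.any (fun r => r.1 == c) ∧
    (rs.foldl pvStepA (PySem.Dict.empty, PySem.Dict.empty)).2.contains c
      = (rs.foldl pvStepA (PySem.Dict.empty, PySem.Dict.empty)).1.contains c := by
  induction rs using List.reverseRecOn generalizing c with
  | nil => simp [pvT, pvU, PySem.Dict.getD_empty, PySem.Dict.contains_empty]
  | append_singleton rs r ih =>
    rw [List.foldl_append]
    obtain ⟨ihT, ihU, ihC, ihE⟩ := ih c
    obtain ⟨ihT', ihU', ihC', ihE'⟩ := ih r.1
    simp only [List.foldl_cons, List.foldl_nil, pvStepA]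
    by_cases hc : (rs.foldl pvStepA (PySem.Dict.empty, PySem.Dict.empty)).1.contains r.1
    · simp only [hc, if_true]
      have hany : (rs.any fun x => x.1 == r.1) = true := by rw [← ihC']; exact hc
      rcases eq_or_ne c r.1 with he | he
      · subst he
        by_cases hup : r.2.2.2 <;>
          simp [hup, pvT_append, pvU_append, PySem.Dict.getD_insert,
            PySem.Dict.contains_insert, ihT, ihU, ihC, ihE, List.any_append, hc, hany]
      · have hbe : (c == r.1) = false := by simpa using he
        have hbe' : (r.1 == c) = false := by simpa using Ne.symm he
        by_cases hup : r.2.2.2 <;>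
          simp [hup, pvT_append, pvU_append, PySem.Dict.getD_insert,
            PySem.Dict.contains_insert, ihT, ihU, ihC, ihE, List.any_append,
            he, Ne.symm he, hbe, hbe']
    · simp only [hc]
      have hz := pvT_zero r.1 rs (by rw [← ihC']; exact Bool.not_eq_true _ ▸ (by simpa using hc))
      rcases eq_or_ne c r.1 with he | he
      · subst he
        by_cases hup : r.2.2.2 <;>
          simp [hup, pvT_append, pvU_append, PySem.Dict.getD_insert,
            PySem.Dict.contains_insert, ihT, ihU, ihC, ihE, List.any_append,
            hz.1, hz.2, hc]
      · have hbe : (c == r.1) = false := by simpa using he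
        have hbe' : (r.1 == c) = false := by simpa using Ne.symm he
        by_cases hup : r.2.2.2 <;>
          simp [hup, pvT_append, pvU_append, PySem.Dict.getD_insert,
            PySem.Dict.contains_insert, ihT, ihU, ihC, ihE, List.any_append,
            he, Ne.symm he, hbe, hbe']

theorem pvSumIte (x : String) (d : Int) (cids : List String) :
    (cids.map (fun c => if x = c then d else 0)).sum = d * (cids.count x : Int) := by
  induction cids with
  | nil => simp
  | cons c cids ih =>
    rcases eq_or_ne x c with h | h
    · subst h
      simp [ih]
      ring
    · simp [h, Ne.symm h, ih]

theorem pvExchange (rs : List (String × Int × Int × Bool)) (cids : List String) :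
    (cids.map (fun c => pvT c rs)).sum
      = (rs.map (fun r => (r.2.2.1 - r.2.1) * (PySem.List.count cids r.1 : Int))).sum ∧
    (cids.map (fun c => pvU c rs)).sum
      = (rs.map (fun r => if r.2.2.2 then (r.2.2.1 - r.2.1) * (PySem.List.count cids r.1 : Int) else 0)).sum := by
  induction rs with
  | nil => simp [pvT, pvU]
  | cons r rs ih =>
    have hT : ∀ c, pvT c (r :: rs) = (if r.1 = c then r.2.2.1 - r.2.1 else 0) + pvT c rs := by
      intro c; simp [pvT]
    have hU : ∀ c, pvU c (r :: rs)
        = (if r.1 = c then (if r.2.2.2 then r.2.2.1 - r.2.1 else 0) else 0) + pvU c rs := by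
      intro c; simp [pvU]
    simp only [hT, hU, List.map_cons, List.sum_cons]
    rw [PySem.List.sum_map_add_int, PySem.List.sum_map_add_int, pvSumIte, pvSumIte, ih.1, ih.2,
      PySem.List.count_eq]
    constructor
    · rfl
    · congr 1
      by_cases hu : r.2.2.2 <;> simp [hu]

theorem pvFoldB (cids : List String) (rs : List (String × Int × Int × Bool)) (q : Int × Int) :
    rs.foldl
      (fun (q : Int × Int) r =>
        let n := PySem.List.count cids r.1
        if n ≠ 0 then
          let d := (r.2.2.1 - r.2.1) * (n : Int)
          ((if r.2.2.2 then q.1 + d else q.1), q.2 + d)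
        else q) q
    = (q.1 + (rs.map (fun r => if r.2.2.2 then (r.2.2.1 - r.2.1) * (PySem.List.count cids r.1 : Int) else 0)).sum,
       q.2 + (rs.map (fun r => (r.2.2.1 - r.2.1) * (PySem.List.count cids r.1 : Int))).sum) := by
  induction rs generalizing q with
  | nil => simp
  | cons r rs ih =>
    simp only [List.foldl_cons, List.map_cons, List.sum_cons, ih]
    by_cases hn : List.count r.1 cids = 0 <;>
      by_cases hup : r.2.2.2 <;>
        simp [PySem.List.count_eq, hn, hup, Prod.ext_iff] <;>
          (try constructor) <;> ring

theorem pvScoreB_sum (rs : List (String × Int × Int × Bool)) (cids : List String) :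
    pvScoreB rs cids =
      (if ((rs.map (fun r => (r.2.2.1 - r.2.1) * (PySem.List.count cids r.1 : Int))).sum > 0) then
        PySem.Int.floordiv
          ((rs.map (fun r => if r.2.2.2 then (r.2.2.1 - r.2.1) * (PySem.List.count cids r.1 : Int) else 0)).sum * 100)
          ((rs.map (fun r => (r.2.2.1 - r.2.1) * (PySem.List.count cids r.1 : Int))).sum)
      else 0) := by
  unfold pvScoreB
  rw [pvFoldB]
  simp

theorem pvFoldInnerA (rs : List (String × Int × Int × Bool)) (cids : List String) (q : Int × Int) :
    cids.foldl
      (fun (q : Int × Int) c =>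
        if (rs.foldl pvStepA (PySem.Dict.empty, PySem.Dict.empty)).1.contains c then
          (q.1 + (rs.foldl pvStepA (PySem.Dict.empty, PySem.Dict.empty)).1.getD c 0,
           q.2 + (rs.foldl pvStepA (PySem.Dict.empty, PySem.Dict.empty)).2.getD c 0)
        else q) q
    = (q.1 + (cids.map (fun c => pvU c rs)).sum, q.2 + (cids.map (fun c => pvT c rs)).sum) := by
  induction cids generalizing q with
  | nil => simp
  | cons c cids ih =>
    simp only [List.foldl_cons, List.map_cons, List.sum_cons, ih]
    obtain ⟨hT, hU, hC, -⟩ := pvFoldA_inv rs c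
    by_cases hc : (rs.foldl pvStepA (PySem.Dict.empty, PySem.Dict.empty)).1.contains c
    · simp only [hc, if_true, hT, hU, Prod.ext_iff]
      constructor <;> ring
    · have hz := pvT_zero c rs (by rw [← hC]; simpa using hc)
      simp [hc, hz.1, hz.2]

theorem pvScoreA_sum (rs : List (String × Int × Int × Bool)) (cids : List String) :
    pvScoreA (rs.foldl pvStepA (PySem.Dict.empty, PySem.Dict.empty)) cids =
      (if ((cids.map (fun c => pvT c rs)).sum > 0) then
        PySem.Int.floordiv ((cids.map (fun c => pvU c rs)).sum * 100) ((cids.map (fun c => pvT c rs)).sum)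
      else 0) := by
  unfold pvScoreA
  rw [pvFoldInnerA]
  simp

theorem pvScore_eq (rs : List (String × Int × Int × Bool)) (cids : List String) :
    pvScoreA (rs.foldl pvStepA (PySem.Dict.empty, PySem.Dict.empty)) cids = pvScoreB rs cids := by
  rw [pvScoreA_sum, pvScoreB_sum, (pvExchange rs cids).1, (pvExchange rs cids).2]

-- ===== VERDICT (by name: the statement is the Claim_ definition above) =====
theorem calculate_uptime_spec : Claim_equal_calculate_uptime := by
  intro stations reports _
  unfold Spec_calculate_uptime calculate_uptime calculate_uptime_alt
  have h : (fun (acc : PySem.Dict String Int) (sc : String × List String) =>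
      acc.insert sc.1 (pvScoreA (reports.foldl pvStepA (PySem.Dict.empty, PySem.Dict.empty)) sc.2))
      = (fun (acc : PySem.Dict String Int) sc => acc.insert sc.1 (pvScoreB reports sc.2)) := by
    funext acc sc; rw [pvScore_eq]
  simp only [h]
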